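-- pv_equiv track=rewrite | github.com/johnnypuskar/foreverdm | src/combat/map/map_utils.py | get_tiles_in_line
-- ===== SOURCE A (Python) =====
-- def get_tiles_in_line(start, end):
--     """
--     Returns a list of connected tiles between two points.
--     Function ignores height, and returned points will all be at the height of the start point.
--
--     Based off Bresenham's line algorithm for 3D points.
--
--     param start: tuple[int, int, int] - The starting point.
--     param end: tuple[int, int, int] - The ending point.
--     return: list[tuple[int, int, int]] - A list of points between the start and end points, ordered from start to end
--     """
--     points = [start]
--     x1, y1, z1 = start
--     x2, y2, z2 = end
--     dx = abs(x2 - x1)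
--     dy = abs(y2 - y1)
--     dz = abs(z2 - z1)
--     xs = 1 if x2 > x1 else -1
--     ys = 1 if y2 > y1 else -1
--     zs = 1 if z2 > z1 else -1
--
--     if dx >= dy and dx >= dz:
--         p1 = 2 * dy - dx
--         p2 = 2 * dz - dx
--         while (x1 != x2):
--             x1 += xs
--             if (p1 >= 0):
--                 y1 += ys
--                 p1 -= 2 * dx
--             if (p2 >= 0):
--                 z1 += zs
--                 p2 -= 2 * dx
--             p1 += 2 * dy
--             p2 += 2 * dz
--             points.append((x1, y1, z1))
--     elif dy >= dx and dy >= dz: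
--         p1 = 2 * dx - dy
--         p2 = 2 * dz - dy
--         while (y1 != y2):
--             y1 += ys
--             if (p1 >= 0):
--                 x1 += xs
--                 p1 -= 2 * dy
--             if (p2 >= 0):
--                 z1 += zs
--                 p2 -= 2 * dy
--             p1 += 2 * dx
--             p2 += 2 * dz
--             points.append((x1, y1, z1))
--     else:
--         p1 = 2 * dy - dz
--         p2 = 2 * dx - dz
--         while (z1 != z2):
--             z1 += zs
--             if (p1 >= 0):
--                 y1 += ys
--                 p1 -= 2 * dz
--             if (p2 >= 0):
--                 x1 += xs
--                 p2 -= 2 * dz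
--             p1 += 2 * dy
--             p2 += 2 * dx
--             points.append((x1, y1, z1))
--     return points
-- ===== SOURCE B (Python) =====
-- def get_tiles_in_line(start, end):
--     """Closed-form Bresenham: each point computed directly from its index."""
--     x1, y1, z1 = start
--     x2, y2, z2 = end
--     dx, dy, dz = abs(x2 - x1), abs(y2 - y1), abs(z2 - z1)
--     xs = 1 if x2 > x1 else -1
--     ys = 1 if y2 > y1 else -1
--     zs = 1 if z2 > z1 else -1
--     if dx >= dy and dx >= dz:
--         return [start] + [
--             (x1 + xs * i,
--              y1 + ys * ((2 * i * dy + dx) // (2 * dx)),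
--              z1 + zs * ((2 * i * dz + dx) // (2 * dx)))
--             for i in range(1, dx + 1)]
--     elif dy >= dx and dy >= dz:
--         return [start] + [
--             (x1 + xs * ((2 * i * dx + dy) // (2 * dy)),
--              y1 + ys * i,
--              z1 + zs * ((2 * i * dz + dy) // (2 * dy)))
--             for i in range(1, dy + 1)]
--     else:
--         return [start] + [
--             (x1 + xs * ((2 * i * dx + dz) // (2 * dz)),
--              y1 + ys * ((2 * i * dy + dz) // (2 * dz)),
--              z1 + zs * i)
--             for i in range(1, dz + 1)]
-- ===== Notes on version B (the rewrite author's own statement) =====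
-- stated objective: alternative
-- what changed: Replaces A's incremental Bresenham error-parameter loop (state p1/p2 updated per step) with a direct closed-form evaluation: each point's minor coordinates are computed independently per index i as start + sign*((2*i*delta + D)//(2*D)) over range(1, D+1).
import Mathlib
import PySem

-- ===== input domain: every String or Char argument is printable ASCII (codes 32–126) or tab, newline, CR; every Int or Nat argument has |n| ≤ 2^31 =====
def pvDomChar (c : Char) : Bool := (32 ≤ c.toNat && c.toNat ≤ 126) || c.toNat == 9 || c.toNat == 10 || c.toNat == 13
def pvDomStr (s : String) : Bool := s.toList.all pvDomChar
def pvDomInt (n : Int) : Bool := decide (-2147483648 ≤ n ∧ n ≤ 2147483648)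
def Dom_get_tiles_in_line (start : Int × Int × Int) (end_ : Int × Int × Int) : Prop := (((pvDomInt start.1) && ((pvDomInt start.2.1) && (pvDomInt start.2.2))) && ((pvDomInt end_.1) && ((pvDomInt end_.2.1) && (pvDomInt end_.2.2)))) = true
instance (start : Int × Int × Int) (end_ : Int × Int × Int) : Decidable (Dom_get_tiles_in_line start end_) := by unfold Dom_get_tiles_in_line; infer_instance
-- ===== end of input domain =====

-- B replaces A's incremental error-parameter Bresenham loop with a closed-form
-- per-index evaluation of each point (objective: alternative; same cost).

-- ===== PORT A =====
-- while (x1 != x2) loop of the x-dominant branch; fuel = dx bounds the iterations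
def loopAx (fuel : Nat) (x2 xs ys zs dx dy dz x1 y1 z1 p1 p2 : Int) : List (Int × Int × Int) :=
  match fuel with
  | 0 => []
  | Nat.succ n =>
    if x1 = x2 then []
    else
      let x1' := x1 + xs
      let y1' := if p1 ≥ 0 then y1 + ys else y1
      let p1' := (if p1 ≥ 0 then p1 - 2*dx else p1) + 2*dy
      let z1' := if p2 ≥ 0 then z1 + zs else z1
      let p2' := (if p2 ≥ 0 then p2 - 2*dx else p2) + 2*dz
      (x1', y1', z1') :: loopAx n x2 xs ys zs dx dy dz x1' y1' z1' p1' p2'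

-- while (y1 != y2) loop of the y-dominant branch
def loopAy (fuel : Nat) (y2 xs ys zs dx dy dz x1 y1 z1 p1 p2 : Int) : List (Int × Int × Int) :=
  match fuel with
  | 0 => []
  | Nat.succ n =>
    if y1 = y2 then []
    else
      let y1' := y1 + ys
      let x1' := if p1 ≥ 0 then x1 + xs else x1
      let p1' := (if p1 ≥ 0 then p1 - 2*dy else p1) + 2*dx
      let z1' := if p2 ≥ 0 then z1 + zs else z1
      let p2' := (if p2 ≥ 0 then p2 - 2*dy else p2) + 2*dz
      (x1', y1', z1') :: loopAy n y2 xs ys zs dx dy dz x1' y1' z1' p1' p2'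

-- while (z1 != z2) loop of the z-dominant branch
def loopAz (fuel : Nat) (z2 xs ys zs dx dy dz x1 y1 z1 p1 p2 : Int) : List (Int × Int × Int) :=
  match fuel with
  | 0 => []
  | Nat.succ n =>
    if z1 = z2 then []
    else
      let z1' := z1 + zs
      let y1' := if p1 ≥ 0 then y1 + ys else y1
      let p1' := (if p1 ≥ 0 then p1 - 2*dz else p1) + 2*dy
      let x1' := if p2 ≥ 0 then x1 + xs else x1
      let p2' := (if p2 ≥ 0 then p2 - 2*dz else p2) + 2*dx
      (x1', y1', z1') :: loopAz n z2 xs ys zs dx dy dz x1' y1' z1' p1' p2'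

def get_tiles_in_line (start : Int × Int × Int) (end_ : Int × Int × Int) : List (Int × Int × Int) :=
  match start, end_ with
  | (x1, y1, z1), (x2, y2, z2) =>
    let dx := |x2 - x1|
    let dy := |y2 - y1|
    let dz := |z2 - z1|
    let xs : Int := if x2 > x1 then 1 else -1
    let ys : Int := if y2 > y1 then 1 else -1
    let zs : Int := if z2 > z1 then 1 else -1
    if dx ≥ dy ∧ dx ≥ dz then
      (x1, y1, z1) :: loopAx dx.toNat x2 xs ys zs dx dy dz x1 y1 z1 (2*dy - dx) (2*dz - dx)
    else if dy ≥ dx ∧ dy ≥ dz then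
      (x1, y1, z1) :: loopAy dy.toNat y2 xs ys zs dx dy dz x1 y1 z1 (2*dx - dy) (2*dz - dy)
    else
      (x1, y1, z1) :: loopAz dz.toNat z2 xs ys zs dx dy dz x1 y1 z1 (2*dy - dz) (2*dx - dz)

-- ===== PORT B =====
def get_tiles_in_line_alt (start : Int × Int × Int) (end_ : Int × Int × Int) : List (Int × Int × Int) :=
  match start, end_ with
  | (x1, y1, z1), (x2, y2, z2) =>
    let dx := |x2 - x1|
    let dy := |y2 - y1|
    let dz := |z2 - z1|
    let xs : Int := if x2 > x1 then 1 else -1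
    let ys : Int := if y2 > y1 then 1 else -1
    let zs : Int := if z2 > z1 then 1 else -1
    if dx ≥ dy ∧ dx ≥ dz then
      (x1, y1, z1) :: (PySem.List.pyRange 1 (dx + 1) 1).map (fun i =>
        (x1 + xs * i,
         y1 + ys * PySem.Int.floordiv (2*i*dy + dx) (2*dx),
         z1 + zs * PySem.Int.floordiv (2*i*dz + dx) (2*dx)))
    else if dy ≥ dx ∧ dy ≥ dz then
      (x1, y1, z1) :: (PySem.List.pyRange 1 (dy + 1) 1).map (fun i =>
        (x1 + xs * PySem.Int.floordiv (2*i*dx + dy) (2*dy),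
         y1 + ys * i,
         z1 + zs * PySem.Int.floordiv (2*i*dz + dy) (2*dy)))
    else
      (x1, y1, z1) :: (PySem.List.pyRange 1 (dz + 1) 1).map (fun i =>
        (x1 + xs * PySem.Int.floordiv (2*i*dx + dz) (2*dz),
         y1 + ys * PySem.Int.floordiv (2*i*dy + dz) (2*dz),
         z1 + zs * i))

-- ===== PRECONDITION & SPEC =====
def Spec_get_tiles_in_line (start : Int × Int × Int) (end_ : Int × Int × Int) (out : List (Int × Int × Int)) : Prop := out = get_tiles_in_line_alt start end_
instance (start : Int × Int × Int) (end_ : Int × Int × Int) (out : List (Int × Int × Int)) : Decidable (Spec_get_tiles_in_line start end_ out) := by unfold Spec_get_tiles_in_line; infer_instance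

-- ===== CLAIM (what is proved, stated in full; the proofs are below) =====
def Claim_equal_get_tiles_in_line : Prop := ∀ (start : Int × Int × Int) (end_ : Int × Int × Int), Dom_get_tiles_in_line start end_ → Spec_get_tiles_in_line start end_ (get_tiles_in_line start end_)

-- ===== LEMMAS AND PROOFS =====

-- closed-form minor-coordinate offset after i steps with minor delta m, dominant delta d
def fq (m d i : Int) : Int := PySem.Int.floordiv (2*i*m + d) (2*d)

theorem ediv_bounds (a b : Int) (hb : 0 < b) : b * (a / b) ≤ a ∧ a < b * (a / b) + b := by
  have h0 := Int.ediv_add_emod a b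
  have h1 := Int.emod_nonneg a (ne_of_gt hb)
  have h2 := Int.emod_lt_of_pos a hb
  omega

theorem floor_step (d m N q q' : Int) (hd : 0 < d) (hm0 : 0 ≤ m) (hmd : m ≤ d)
    (h1 : 2*d*q ≤ N) (h2 : N < 2*d*q + 2*d)
    (h3 : 2*d*q' ≤ N + 2*m) (h4 : N + 2*m < 2*d*q' + 2*d) :
    q' = q + (if N + 2*m - 2*d*q - 2*d ≥ 0 then 1 else 0) := by
  have hpos : (0:Int) < 2*d := by omega
  have hA : q' < q + 2 := by
    have : 2*d*q' < 2*d*(q+2) := by nlinarith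
    exact lt_of_mul_lt_mul_left this (by omega)
  have hB : q < q' + 1 := by
    have : 2*d*q < 2*d*(q'+1) := by nlinarith
    exact lt_of_mul_lt_mul_left this (by omega)
  split_ifs with h
  · have : 2*d*(q+1) < 2*d*(q'+1) := by nlinarith
    have := lt_of_mul_lt_mul_left this (by omega : (0:Int) ≤ 2*d)
    omega
  · have : 2*d*q' < 2*d*(q+1) := by nlinarith
    have := lt_of_mul_lt_mul_left this (by omega : (0:Int) ≤ 2*d)
    omega

theorem fq_zero (m d : Int) (hd : 0 < d) (_hm : 0 ≤ m) : fq m d 0 = 0 := by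
  unfold fq
  rw [PySem.Int.floordiv_eq_ediv_of_pos (by omega)]
  have := ediv_bounds (2*0*m + d) (2*d) (by omega)
  nlinarith [this.1, this.2]

theorem fq_step (m d i : Int) (hd : 0 < d) (hm0 : 0 ≤ m) (hmd : m ≤ d) :
    fq m d (i+1) = fq m d i + (if 2*(i+1)*m - d - 2*d * fq m d i ≥ 0 then 1 else 0) := by
  unfold fq
  rw [PySem.Int.floordiv_eq_ediv_of_pos (by omega), PySem.Int.floordiv_eq_ediv_of_pos (by omega)]
  have hb1 := ediv_bounds (2*i*m + d) (2*d) (by omega)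
  have hb2 := ediv_bounds (2*(i+1)*m + d) (2*d) (by omega)
  have hN : 2*(i+1)*m + d = (2*i*m + d) + 2*m := by ring
  rw [hN] at hb2
  have := floor_step d m (2*i*m + d) ((2*i*m + d) / (2*d)) (((2*i*m + d) + 2*m) / (2*d))
      hd hm0 hmd hb1.1 hb1.2 hb2.1 hb2.2
  rw [show (2*(i+1)*m + d) = (2*i*m + d) + 2*m from by ring]
  rw [this]
  congr 1
  split_ifs with h1 h2 h2 <;> first | rfl | (exfalso; omega)

theorem loopAx_eq (x0 y0 z0 xs ys zs dx dy dz : Int) (hdx : 0 < dx) (hxs : xs = 1 ∨ xs = -1)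
    (hy0 : 0 ≤ dy) (hyd : dy ≤ dx) (hz0 : 0 ≤ dz) (hzd : dz ≤ dx) :
    ∀ (n : Nat) (i : Int), 0 ≤ i → i + n = dx →
    loopAx n (x0 + xs*dx) xs ys zs dx dy dz (x0 + xs*i) (y0 + ys * fq dy dx i) (z0 + zs * fq dz dx i)
      (2*(i+1)*dy - dx - 2*dx * fq dy dx i) (2*(i+1)*dz - dx - 2*dx * fq dz dx i)
    = (PySem.List.pyRange (i+1) (dx+1) 1).map
        (fun j => (x0 + xs*j, y0 + ys * fq dy dx j, z0 + zs * fq dz dx j)) := by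
  intro n
  induction n with
  | zero =>
    intro i h0 hi
    simp only [Nat.cast_zero, add_zero] at hi
    subst hi
    rw [PySem.List.pyRange_one_eq_nil (by omega)]
    rfl
  | succ n ih =>
    intro i h0 hi
    have hlt : i < dx := by push_cast at hi; omega
    have hne : x0 + xs*i ≠ x0 + xs*dx := by
      rcases hxs with h | h <;> subst h <;> intro hc <;> omega
    have hy := fq_step dy dx i hdx hy0 hyd
    have hz := fq_step dz dx i hdx hz0 hzd
    have IH := ih (i+1) (by omega) (by push_cast at hi ⊢; omega)
    simp only [loopAx, if_neg hne]
    rw [PySem.List.pyRange_one_cons (by omega), List.map_cons]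
    congr 1
    · simp only [Prod.mk.injEq]
      refine ⟨by ring, ?_, ?_⟩
      · rw [hy]; split_ifs with h <;> ring
      · rw [hz]; split_ifs with h <;> ring
    · rw [← IH]
      congr 1
      · ring
      · rw [hy]; split_ifs with h <;> ring
      · rw [hz]; split_ifs with h <;> ring
      · rw [hy]; split_ifs with h <;> ring
      · rw [hz]; split_ifs with h <;> ring

theorem loopAy_eq (x0 y0 z0 xs ys zs dx dy dz : Int) (hdy : 0 < dy) (hys : ys = 1 ∨ ys = -1)
    (hx0 : 0 ≤ dx) (hxd : dx ≤ dy) (hz0 : 0 ≤ dz) (hzd : dz ≤ dy) :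
    ∀ (n : Nat) (i : Int), 0 ≤ i → i + n = dy →
    loopAy n (y0 + ys*dy) xs ys zs dx dy dz (x0 + xs * fq dx dy i) (y0 + ys*i) (z0 + zs * fq dz dy i)
      (2*(i+1)*dx - dy - 2*dy * fq dx dy i) (2*(i+1)*dz - dy - 2*dy * fq dz dy i)
    = (PySem.List.pyRange (i+1) (dy+1) 1).map
        (fun j => (x0 + xs * fq dx dy j, y0 + ys*j, z0 + zs * fq dz dy j)) := by
  intro n
  induction n with
  | zero =>
    intro i h0 hi
    simp only [Nat.cast_zero, add_zero] at hi
    subst hi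
    rw [PySem.List.pyRange_one_eq_nil (by omega)]
    rfl
  | succ n ih =>
    intro i h0 hi
    have hlt : i < dy := by push_cast at hi; omega
    have hne : y0 + ys*i ≠ y0 + ys*dy := by
      rcases hys with h | h <;> subst h <;> intro hc <;> omega
    have hx := fq_step dx dy i hdy hx0 hxd
    have hz := fq_step dz dy i hdy hz0 hzd
    have IH := ih (i+1) (by omega) (by push_cast at hi ⊢; omega)
    simp only [loopAy, if_neg hne]
    rw [PySem.List.pyRange_one_cons (by omega), List.map_cons]
    congr 1
    · simp only [Prod.mk.injEq]
      refine ⟨?_, by ring, ?_⟩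
      · rw [hx]; split_ifs with h <;> ring
      · rw [hz]; split_ifs with h <;> ring
    · rw [← IH]
      congr 1
      · rw [hx]; split_ifs with h <;> ring
      · ring
      · rw [hz]; split_ifs with h <;> ring
      · rw [hx]; split_ifs with h <;> ring
      · rw [hz]; split_ifs with h <;> ring

theorem loopAz_eq (x0 y0 z0 xs ys zs dx dy dz : Int) (hdz : 0 < dz) (hzs : zs = 1 ∨ zs = -1)
    (hx0 : 0 ≤ dx) (hxd : dx ≤ dz) (hy0 : 0 ≤ dy) (hyd : dy ≤ dz) :
    ∀ (n : Nat) (i : Int), 0 ≤ i → i + n = dz →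
    loopAz n (z0 + zs*dz) xs ys zs dx dy dz (x0 + xs * fq dx dz i) (y0 + ys * fq dy dz i) (z0 + zs*i)
      (2*(i+1)*dy - dz - 2*dz * fq dy dz i) (2*(i+1)*dx - dz - 2*dz * fq dx dz i)
    = (PySem.List.pyRange (i+1) (dz+1) 1).map
        (fun j => (x0 + xs * fq dx dz j, y0 + ys * fq dy dz j, z0 + zs*j)) := by
  intro n
  induction n with
  | zero =>
    intro i h0 hi
    simp only [Nat.cast_zero, add_zero] at hi
    subst hi
    rw [PySem.List.pyRange_one_eq_nil (by omega)]
    rfl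
  | succ n ih =>
    intro i h0 hi
    have hlt : i < dz := by push_cast at hi; omega
    have hne : z0 + zs*i ≠ z0 + zs*dz := by
      rcases hzs with h | h <;> subst h <;> intro hc <;> omega
    have hx := fq_step dx dz i hdz hx0 hxd
    have hy := fq_step dy dz i hdz hy0 hyd
    have IH := ih (i+1) (by omega) (by push_cast at hi ⊢; omega)
    simp only [loopAz, if_neg hne]
    rw [PySem.List.pyRange_one_cons (by omega), List.map_cons]
    congr 1
    · simp only [Prod.mk.injEq]
      refine ⟨?_, ?_, by ring⟩
      · rw [hx]; split_ifs with h <;> ring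
      · rw [hy]; split_ifs with h <;> ring
    · rw [← IH]
      congr 1
      · rw [hx]; split_ifs with h <;> ring
      · rw [hy]; split_ifs with h <;> ring
      · ring
      · rw [hy]; split_ifs with h <;> ring
      · rw [hx]; split_ifs with h <;> ring

-- ===== VERDICT (by name: the statement is the Claim_ definition above) =====
theorem get_tiles_in_line_spec : Claim_equal_get_tiles_in_line := by
  intro start end_ _
  unfold Spec_get_tiles_in_line get_tiles_in_line get_tiles_in_line_alt
  obtain ⟨x1, y1, z1⟩ := start
  obtain ⟨x2, y2, z2⟩ := end_
  simp only
  set dx := |x2 - x1| with hdx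
  set dy := |y2 - y1| with hdy
  set dz := |z2 - z1| with hdz
  set xs : Int := if x2 > x1 then 1 else -1 with hxs
  set ys : Int := if y2 > y1 then 1 else -1 with hys
  set zs : Int := if z2 > z1 then 1 else -1 with hzs
  have hdx0 : 0 ≤ dx := abs_nonneg _
  have hdy0 : 0 ≤ dy := abs_nonneg _
  have hdz0 : 0 ≤ dz := abs_nonneg _
  have hxs1 : xs = 1 ∨ xs = -1 := by rw [hxs]; split_ifs <;> simp
  have hys1 : ys = 1 ∨ ys = -1 := by rw [hys]; split_ifs <;> simp
  have hzs1 : zs = 1 ∨ zs = -1 := by rw [hzs]; split_ifs <;> simp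
  have hx2 : x2 = x1 + xs * dx := by
    rw [hxs, hdx]; rcases abs_cases (x2 - x1) with ⟨h, h2⟩ | ⟨h, h2⟩ <;> split_ifs <;> omega
  have hy2 : y2 = y1 + ys * dy := by
    rw [hys, hdy]; rcases abs_cases (y2 - y1) with ⟨h, h2⟩ | ⟨h, h2⟩ <;> split_ifs <;> omega
  have hz2 : z2 = z1 + zs * dz := by
    rw [hzs, hdz]; rcases abs_cases (z2 - z1) with ⟨h, h2⟩ | ⟨h, h2⟩ <;> split_ifs <;> omega
  by_cases hb1 : dx ≥ dy ∧ dx ≥ dz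
  · rw [if_pos hb1, if_pos hb1]
    by_cases h0 : dx = 0
    · have : dx.toNat = 0 := by omega
      rw [this]
      try rfl
      rw [PySem.List.pyRange_one_eq_nil (by omega)]
      rfl
    · have hdxp : 0 < dx := by omega
      have := loopAx_eq x1 y1 z1 xs ys zs dx dy dz hdxp hxs1 hdy0 hb1.1 hdz0 hb1.2
        dx.toNat 0 (le_refl 0) (by omega)
      simp only [fq_zero dy dx hdxp hdy0, fq_zero dz dx hdxp hdz0, mul_zero, add_zero,
        zero_add] at this
      rw [← hx2] at this
      rw [show (2*1*dy - dx - 0 : Int) = 2*dy - dx from by ring,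
        show (2*1*dz - dx - 0 : Int) = 2*dz - dx from by ring] at this
      rw [this]
      try rfl
  · rw [if_neg hb1, if_neg hb1]
    by_cases hb2 : dy ≥ dx ∧ dy ≥ dz
    · rw [if_pos hb2, if_pos hb2]
      have hdyp : 0 < dy := by omega
      have := loopAy_eq x1 y1 z1 xs ys zs dx dy dz hdyp hys1 hdx0 hb2.1 hdz0 hb2.2
        dy.toNat 0 (le_refl 0) (by omega)
      simp only [fq_zero dx dy hdyp hdx0, fq_zero dz dy hdyp hdz0, mul_zero, add_zero,
        zero_add] at this
      rw [← hy2] at this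
      rw [show (2*1*dx - dy - 0 : Int) = 2*dx - dy from by ring,
        show (2*1*dz - dy - 0 : Int) = 2*dz - dy from by ring] at this
      rw [this]
      try rfl
    · rw [if_neg hb2, if_neg hb2]
      have hdzp : 0 < dz := by omega
      have hxd : dx ≤ dz := by omega
      have hyd : dy ≤ dz := by omega
      have := loopAz_eq x1 y1 z1 xs ys zs dx dy dz hdzp hzs1 hdx0 hxd hdy0 hyd
        dz.toNat 0 (le_refl 0) (by omega)
      simp only [fq_zero dx dz hdzp hdx0, fq_zero dy dz hdzp hdy0, mul_zero, add_zero,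
        zero_add] at this
      rw [← hz2] at this
      rw [show (2*1*dy - dz - 0 : Int) = 2*dy - dz from by ring,
        show (2*1*dx - dz - 0 : Int) = 2*dx - dz from by ring] at this
      rw [this]
      try rfl
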